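-- pv_equiv track=rewrite | github.com/Galaxy13/python-scripts | hse/python advanced (mod 1)/week 4/matrix.py | countdet_3
-- ===== SOURCE A (Python) =====
-- from functools import reduce
--
-- def countdet_3(matrix):
--     sumdet = sum([reduce(lambda x, y: x * y,
--                          [matrix[irow][(lambda icol: (icol + irow) % len(matrix))(icol)] for irow in
--                           range(len(matrix))]) for icol in range(len(matrix))])
--     subdet = sum([reduce(lambda x, y: x * y,
--                          [matrix[irow][(lambda icol: (icol - irow))(icol)] for irow in range(len(matrix))]) for
--                   icol in range(len(matrix) - 1, -1, -1)])
--     return sumdet - subdet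
-- ===== SOURCE B (Python) =====
-- def countdet_3(matrix):
--     n = len(matrix)
--     fwd = [matrix[0][icol] for icol in range(n)]
--     bwd = [matrix[0][icol] for icol in range(n)]
--     for irow in range(1, n):
--         fwd = [f * matrix[irow][(icol + irow) % n] for icol, f in enumerate(fwd)]
--         bwd = [b * matrix[irow][icol - irow] for icol, b in enumerate(bwd)]
--     return sum(fwd) - sum(bwd)
-- ===== Notes on version B (the rewrite author's own statement) =====
-- stated objective: alternative
-- what changed: Replaces A's per-diagonal nested comprehensions with reduce by a single row-major pass that maintains running-product arrays for all forward and backward diagonals simultaneously, summing at the end.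
import Mathlib
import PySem

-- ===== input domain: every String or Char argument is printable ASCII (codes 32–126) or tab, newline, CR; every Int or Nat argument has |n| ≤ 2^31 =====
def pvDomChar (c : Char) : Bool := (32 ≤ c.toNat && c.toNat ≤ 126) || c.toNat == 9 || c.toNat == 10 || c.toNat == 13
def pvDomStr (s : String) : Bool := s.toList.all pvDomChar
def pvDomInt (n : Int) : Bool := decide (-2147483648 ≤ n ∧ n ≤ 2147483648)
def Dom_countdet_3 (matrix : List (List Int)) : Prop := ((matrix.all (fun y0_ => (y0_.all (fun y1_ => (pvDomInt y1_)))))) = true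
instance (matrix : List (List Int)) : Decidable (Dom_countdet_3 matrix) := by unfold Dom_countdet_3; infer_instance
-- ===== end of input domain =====

-- B replaces A's per-diagonal nested products with a single row-major pass maintaining running-product
-- arrays for all forward and backward diagonals at once (objective: alternative decomposition, same cost).

-- ===== PORT A =====
-- reduce(lambda x, y: x * y, lst): no initializer, so foldl of (*) seeded with the head
-- (the [] case is unreachable under Pre_, where every inner list is nonempty).
def reduceMul : List Int → Int
  | [] => 0
  | x :: xs => xs.foldl (· * ·) x

def countdet_3 (matrix : List (List Int)) : Int :=
  let n : Int := matrix.length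
  let sumdet : Int :=
    (((PySem.List.pyRange 0 n 1).map (fun icol =>
        reduceMul ((PySem.List.pyRange 0 n 1).map (fun irow =>
          PySem.List.pyGetD (PySem.List.pyGetD matrix irow [])
            (PySem.Int.mod (icol + irow) n) 0)))).sum)
  let subdet : Int :=
    (((PySem.List.pyRange (n - 1) (-1) (-1)).map (fun icol =>
        reduceMul ((PySem.List.pyRange 0 n 1).map (fun irow =>
          PySem.List.pyGetD (PySem.List.pyGetD matrix irow [])
            (icol - irow) 0)))).sum)
  sumdet - subdet

-- ===== PORT B =====
def countdet_3_alt (matrix : List (List Int)) : Int :=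
  let n : Int := matrix.length
  let fwd0 : List Int :=
    (PySem.List.pyRange 0 n 1).map (fun icol =>
      PySem.List.pyGetD (PySem.List.pyGetD matrix 0 []) icol 0)
  let bwd0 : List Int :=
    (PySem.List.pyRange 0 n 1).map (fun icol =>
      PySem.List.pyGetD (PySem.List.pyGetD matrix 0 []) icol 0)
  let res : List Int × List Int :=
    (PySem.List.pyRange 1 n 1).foldl (fun st irow =>
      ((PySem.List.enumerate st.1).map (fun p =>
          p.2 * PySem.List.pyGetD (PySem.List.pyGetD matrix irow [])
                  (PySem.Int.mod (p.1 + irow) n) 0),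
       (PySem.List.enumerate st.2).map (fun p =>
          p.2 * PySem.List.pyGetD (PySem.List.pyGetD matrix irow [])
                  (p.1 - irow) 0)))
      (fwd0, bwd0)
  res.1.sum - res.2.sum

-- ===== PRECONDITION & SPEC =====
-- Pre_ is exactly the set of inputs on which A returns: every row must have at least
-- len(matrix) entries, otherwise some matrix[irow][...] access raises IndexError.
def Pre_countdet_3 (matrix : List (List Int)) : Prop :=
  ∀ row ∈ matrix, matrix.length ≤ row.length
instance (matrix : List (List Int)) : Decidable (Pre_countdet_3 matrix) := by
  unfold Pre_countdet_3; infer_instance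

def pvWitness_countdet_3 : List (List Int) := [[1, 2, 3], [4, 5, 6], [7, 8, 10]]

def Spec_countdet_3 (matrix : List (List Int)) (out : Int) : Prop := out = countdet_3_alt matrix
instance (matrix : List (List Int)) (out : Int) : Decidable (Spec_countdet_3 matrix out) := by unfold Spec_countdet_3; infer_instance

-- ===== CLAIM (what is proved, stated in full; the proofs are below) =====
def Claim_equal_countdet_3 : Prop := ∀ (matrix : List (List Int)), Dom_countdet_3 matrix → Pre_countdet_3 matrix → Spec_countdet_3 matrix (countdet_3 matrix)

-- ===== LEMMAS AND PROOFS =====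

theorem reduceMul_snoc (xs : List Int) (y : Int) (h : xs ≠ []) :
    reduceMul (xs ++ [y]) = reduceMul xs * y := by
  cases xs with
  | nil => exact absurd rfl h
  | cons x xs => simp [reduceMul, List.foldl_append]

theorem pyRange_zero_ne_nil {k : Int} (h : 0 < k) :
    PySem.List.pyRange 0 k 1 ≠ [] := by
  rw [PySem.List.pyRange_one_cons h]; simp

-- the loop invariant of B's row-major pass, for one of the two accumulator lists
theorem loop_inv (g : Int → Int → Int) (n : Int) :
    ∀ (k : Int), 1 ≤ k → k ≤ n →
    (PySem.List.pyRange k n 1).foldl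
      (fun xs irow => (PySem.List.enumerate xs).map (fun p => p.2 * g irow p.1))
      ((PySem.List.pyRange 0 n 1).map (fun icol =>
        reduceMul ((PySem.List.pyRange 0 k 1).map (fun irow => g irow icol))))
    = (PySem.List.pyRange 0 n 1).map (fun icol =>
        reduceMul ((PySem.List.pyRange 0 n 1).map (fun irow => g irow icol))) := by
  intro k h1 h2
  by_cases hk : k = n
  · subst hk
    rw [PySem.List.pyRange_one_eq_nil (le_refl k)]
    rfl
  · have hkn : k < n := lt_of_le_of_ne h2 hk
    have hstep :
        ((PySem.List.enumerate
            ((PySem.List.pyRange 0 n 1).map (fun icol =>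
              reduceMul ((PySem.List.pyRange 0 k 1).map (fun irow => g irow icol))))).map
          (fun p => p.2 * g k p.1))
        = (PySem.List.pyRange 0 n 1).map (fun icol =>
            reduceMul ((PySem.List.pyRange 0 (k + 1) 1).map (fun irow => g irow icol))) := by
      rw [PySem.List.enumerate_eq_map_pyRange _ 0]
      have hlen : PySem.List.len ((PySem.List.pyRange 0 n 1).map (fun icol =>
          reduceMul ((PySem.List.pyRange 0 k 1).map (fun irow => g irow icol)))) = n := by
        simp [PySem.List.len_eq, PySem.List.length_pyRange_one]
        omega
      rw [hlen, List.map_map]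
      apply List.map_congr_left
      intro j hj
      have hj' := PySem.List.mem_pyRange_one.mp hj
      simp only [Function.comp]
      rw [PySem.List.pyGetD_map_pyRange_of_nonneg _ _ _ _ hj'.1 hj'.2]
      rw [PySem.List.pyRange_one_succ_right (by omega : (0:Int) ≤ k), List.map_append,
        List.map_singleton, reduceMul_snoc]
      intro hnil
      exact pyRange_zero_ne_nil (by omega) (List.map_eq_nil_iff.mp hnil)
    rw [PySem.List.pyRange_one_cons hkn, List.foldl_cons, hstep]
    exact loop_inv g n (k + 1) (by omega) (by omega)
termination_by k => (n - k).toNat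
decreasing_by omega

theorem countdet_3_spec_aux (matrix : List (List Int)) :
    countdet_3 matrix = countdet_3_alt matrix := by
  by_cases h0 : matrix = []
  · subst h0; decide
  · have hn : (0 : Int) < matrix.length := by
      cases matrix with
      | nil => exact absurd rfl h0
      | cons x xs => simp
    unfold countdet_3 countdet_3_alt
    simp only []
    set n : Int := (matrix.length : Int) with hndef
    set g1 : Int → Int → Int := fun irow icol =>
      PySem.List.pyGetD (PySem.List.pyGetD matrix irow []) (PySem.Int.mod (icol + irow) n) 0 with hg1
    set g2 : Int → Int → Int := fun irow icol =>
      PySem.List.pyGetD (PySem.List.pyGetD matrix irow []) (icol - irow) 0 with hg2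
    -- split the paired fold into two independent folds
    rw [PySem.List.foldl_prod_mk
      (fun xs irow => (PySem.List.enumerate xs).map (fun p => p.2 * g1 irow p.1))
      (fun xs irow => (PySem.List.enumerate xs).map (fun p => p.2 * g2 irow p.1))]
    have hfwd :
        (PySem.List.pyRange 1 n 1).foldl
          (fun xs irow => (PySem.List.enumerate xs).map (fun p => p.2 * g1 irow p.1))
          ((PySem.List.pyRange 0 n 1).map (fun icol =>
            PySem.List.pyGetD (PySem.List.pyGetD matrix 0 []) icol 0))
        = (PySem.List.pyRange 0 n 1).map (fun icol =>
            reduceMul ((PySem.List.pyRange 0 n 1).map (fun irow => g1 irow icol))) := by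
      have hseed1 :
          ((PySem.List.pyRange 0 n 1).map (fun icol =>
            PySem.List.pyGetD (PySem.List.pyGetD matrix 0 []) icol 0))
          = (PySem.List.pyRange 0 n 1).map (fun icol =>
              reduceMul ((PySem.List.pyRange 0 1 1).map (fun irow => g1 irow icol))) := by
        apply List.map_congr_left
        intro j hj
        have hj' := PySem.List.mem_pyRange_one.mp hj
        have hr01 : PySem.List.pyRange (0:Int) 1 1 = [0] := by
          have := PySem.List.pyRange_one_singleton (0 : Int); simpa using this
        rw [hr01]
        simp only [List.map_singleton, reduceMul, List.foldl_nil, hg1]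
        rw [PySem.Int.mod_eq_emod_of_pos hn, add_zero, Int.emod_eq_of_lt hj'.1 hj'.2]
      rw [hseed1, loop_inv g1 n 1 (le_refl 1) (by omega)]
    have hbwd :
        (PySem.List.pyRange 1 n 1).foldl
          (fun xs irow => (PySem.List.enumerate xs).map (fun p => p.2 * g2 irow p.1))
          ((PySem.List.pyRange 0 n 1).map (fun icol =>
            PySem.List.pyGetD (PySem.List.pyGetD matrix 0 []) icol 0))
        = (PySem.List.pyRange 0 n 1).map (fun icol =>
            reduceMul ((PySem.List.pyRange 0 n 1).map (fun irow => g2 irow icol))) := by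
      have hseed2 :
          ((PySem.List.pyRange 0 n 1).map (fun icol =>
            PySem.List.pyGetD (PySem.List.pyGetD matrix 0 []) icol 0))
          = (PySem.List.pyRange 0 n 1).map (fun icol =>
              reduceMul ((PySem.List.pyRange 0 1 1).map (fun irow => g2 irow icol))) := by
        apply List.map_congr_left
        intro j hj
        have hr01 : PySem.List.pyRange (0:Int) 1 1 = [0] := by
          have := PySem.List.pyRange_one_singleton (0 : Int); simpa using this
        rw [hr01]
        simp [reduceMul, hg2]
      rw [hseed2, loop_inv g2 n 1 (le_refl 1) (by omega)]
    dsimp only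
    rw [hfwd, hbwd]
    -- A's backward sum runs over the reversed column range; sums ignore order
    have hrev : PySem.List.pyRange (n - 1) (-1) (-1) = (PySem.List.pyRange 0 n 1).reverse := by
      have := PySem.List.pyRange_neg_one_eq_reverse (n - 1) (-1)
      simpa using this
    rw [hrev, List.map_reverse, List.sum_reverse]

-- ===== VERDICT (by name: the statement is the Claim_ definition above) =====
theorem countdet_3_spec : Claim_equal_countdet_3 := by
  intro matrix _ _
  unfold Spec_countdet_3
  exact countdet_3_spec_aux matrix
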